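-- pv_equiv track=rewrite | github.com/learnore/helloshen | z_huawei_od/99_24_od/python/100/57.py | solution
-- ===== SOURCE A (Python) =====
-- def solution(n, lucky_num, input_list):
--     """
--     解题方案
--     1、扫描整个行动坐标，遇到特殊数字，正方向+1负方向-1
--     2、每次行动记录保存当前的最大坐标 max_x
--     """
--     max_x, cur_x = 0, 0
--     for i in input_list:
--         if i == lucky_num and lucky_num < 0:
--             i -= 1
--         elif i == lucky_num and lucky_num > 0:
--             i += 1
--
--         cur_x += i
--         max_x = max(max_x, cur_x)
--
--     return max_x
-- ===== SOURCE B (Python) =====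
-- def solution(n, lucky_num, input_list):
--     # Right-to-left recurrence: the 0-floored max prefix sum M satisfies
--     # M([]) = 0 and M(x :: rest) = max(0, x' + M(rest)), where x' is x
--     # shifted by the lucky-number rule. One accumulator, back-to-front.
--     best = 0
--     for x in reversed(input_list):
--         if x == lucky_num:
--             if lucky_num > 0:
--                 x += 1
--             elif lucky_num < 0:
--                 x -= 1
--         best = max(0, x + best)
--     return best
-- ===== Notes on version B (the rewrite author's own statement) =====
-- stated objective: alternative
-- what changed: A scans left-to-right keeping a (running sum, running max) pair; B uses the recurrence M(x::rest)=max(0,x'+M(rest)) for the 0-floored max prefix sum, computed right-to-left with a single accumulator and no running sum or explicit max over prefixes.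
import Mathlib
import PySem

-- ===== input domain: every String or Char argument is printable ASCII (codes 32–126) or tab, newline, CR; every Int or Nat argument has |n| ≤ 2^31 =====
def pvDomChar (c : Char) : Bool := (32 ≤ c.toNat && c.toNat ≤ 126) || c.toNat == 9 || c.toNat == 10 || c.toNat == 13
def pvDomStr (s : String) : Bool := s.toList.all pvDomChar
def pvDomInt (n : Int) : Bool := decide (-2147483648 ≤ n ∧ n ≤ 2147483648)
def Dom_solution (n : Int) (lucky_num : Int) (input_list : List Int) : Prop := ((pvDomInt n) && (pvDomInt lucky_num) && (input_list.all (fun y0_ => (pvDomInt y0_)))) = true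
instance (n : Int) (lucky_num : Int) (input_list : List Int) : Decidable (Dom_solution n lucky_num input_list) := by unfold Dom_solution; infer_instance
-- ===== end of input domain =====

-- B replaces A's left-to-right (running sum, running max) scan by the right-to-left
-- recurrence best = max(0, x' + best) for the 0-floored max prefix sum; same cost.

-- ===== PORT A =====
def solution (n : Int) (lucky_num : Int) (input_list : List Int) : Int :=
  (input_list.foldl (fun (s : Int × Int) i =>
      let i' : Int :=
        if i = lucky_num ∧ lucky_num < 0 then i - 1
        else if i = lucky_num ∧ lucky_num > 0 then i + 1
        else i
      let cur := s.2 + i'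
      (max s.1 cur, cur)) (0, 0)).1

-- ===== PORT B =====
-- 'for x in reversed(input_list)' with accumulator 'best' = a right fold
def solution_alt (n : Int) (lucky_num : Int) (input_list : List Int) : Int :=
  input_list.foldr (fun x best =>
      let x' : Int :=
        if x = lucky_num then
          (if lucky_num > 0 then x + 1 else if lucky_num < 0 then x - 1 else x)
        else x
      max 0 (x' + best)) 0

-- ===== PRECONDITION & SPEC =====
def Spec_solution (n : Int) (lucky_num : Int) (input_list : List Int) (out : Int) : Prop := out = solution_alt n lucky_num input_list
instance (n : Int) (lucky_num : Int) (input_list : List Int) (out : Int) : Decidable (Spec_solution n lucky_num input_list out) := by unfold Spec_solution; infer_instance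

-- ===== CLAIM (what is proved, stated in full; the proofs are below) =====
def Claim_equal_solution : Prop := ∀ (n : Int) (lucky_num : Int) (input_list : List Int), Dom_solution n lucky_num input_list → Spec_solution n lucky_num input_list (solution n lucky_num input_list)

-- ===== LEMMAS AND PROOFS =====

theorem altFold_nonneg (lucky_num : Int) (xs : List Int) :
    0 ≤ solution_alt 0 lucky_num xs := by
  cases xs with
  | nil => simp [solution_alt]
  | cons x t => exact le_max_left _ _

-- Invariant: with cx ≤ mx, A's fold returns max mx (cx + B's right fold).
theorem fold_eq (lucky_num : Int) :
    ∀ (xs : List Int) (mx cx : Int), cx ≤ mx →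
      (xs.foldl (fun (s : Int × Int) i =>
        let i' : Int :=
          if i = lucky_num ∧ lucky_num < 0 then i - 1
          else if i = lucky_num ∧ lucky_num > 0 then i + 1
          else i
        let cur := s.2 + i'
        (max s.1 cur, cur)) (mx, cx)).1
      = max mx (cx + solution_alt 0 lucky_num xs) := by
  intro xs
  induction xs with
  | nil => intro mx cx h; simp [solution_alt]; omega
  | cons x t ih =>
    intro mx cx h
    have hadj : (if x = lucky_num ∧ lucky_num < 0 then x - 1
        else if x = lucky_num ∧ lucky_num > 0 then x + 1 else x)
        = (if x = lucky_num then
            (if lucky_num > 0 then x + 1 else if lucky_num < 0 then x - 1 else x)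
          else x) := by
      split_ifs <;> omega
    have hcons : solution_alt 0 lucky_num (x :: t)
        = max 0 ((if x = lucky_num then
            (if lucky_num > 0 then x + 1 else if lucky_num < 0 then x - 1 else x)
          else x) + solution_alt 0 lucky_num t) := rfl
    have hb := altFold_nonneg lucky_num t
    simp only [List.foldl]
    rw [hadj, ih (max mx (cx + _)) (cx + _) (le_max_right _ _), hcons]
    generalize (if x = lucky_num then
        (if lucky_num > 0 then x + 1 else if lucky_num < 0 then x - 1 else x)
      else x) = a at *
    generalize solution_alt 0 lucky_num t = b at *
    omega

-- ===== VERDICT (by name: the statement is the Claim_ definition above) =====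
theorem solution_spec : Claim_equal_solution := by
  intro n lucky_num input_list _
  show solution n lucky_num input_list = solution_alt n lucky_num input_list
  have halt : solution_alt n lucky_num input_list = solution_alt 0 lucky_num input_list := rfl
  rw [halt]
  unfold solution
  rw [fold_eq lucky_num input_list 0 0 le_rfl]
  have hb := altFold_nonneg lucky_num input_list
  omega
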